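-- pv_equiv track=rewrite | github.com/kmcos/kmcos | kmcos/interactions/cleanSites.py | removeCommonElements
-- ===== SOURCE A (Python) =====
-- import copy
--
-- def removeCommonElements(list1, list2): #list1 is the list we want common elements removed from. We will cycle through list 2 and try to remove each item from list1.
--     truncatedList = copy.copy(list1) #This line is very important so we don't pop the original list!
--     for elementToTryAndRemove in list2:
--         try:
--             indexToPop = truncatedList.index(elementToTryAndRemove)
--             truncatedList.pop(indexToPop)
--         except:
--             pass
--             #We don't do anything during the exception.
--     return truncatedList
-- ===== SOURCE B (Python) =====
-- def removeCommonElements(list1, list2):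
--     # One pass over list2 builds a multiset of values to drop; one pass over
--     # list1 keeps each element unless a drop-credit for its value remains.
--     remove = {}
--     for x in list2:
--         remove[x] = remove.get(x, 0) + 1
--     result = []
--     for x in list1:
--         if remove.get(x, 0) > 0:
--             remove[x] = remove[x] - 1
--         else:
--             result.append(x)
--     return result
-- ===== Notes on version B (the rewrite author's own statement) =====
-- stated objective: alternative
-- what changed: Replaces the per-element list.index/pop scans over the shrinking copy with a counting dict built from list2 and a single filtering pass over list1 that decrements drop-credits.
import Mathlib
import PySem

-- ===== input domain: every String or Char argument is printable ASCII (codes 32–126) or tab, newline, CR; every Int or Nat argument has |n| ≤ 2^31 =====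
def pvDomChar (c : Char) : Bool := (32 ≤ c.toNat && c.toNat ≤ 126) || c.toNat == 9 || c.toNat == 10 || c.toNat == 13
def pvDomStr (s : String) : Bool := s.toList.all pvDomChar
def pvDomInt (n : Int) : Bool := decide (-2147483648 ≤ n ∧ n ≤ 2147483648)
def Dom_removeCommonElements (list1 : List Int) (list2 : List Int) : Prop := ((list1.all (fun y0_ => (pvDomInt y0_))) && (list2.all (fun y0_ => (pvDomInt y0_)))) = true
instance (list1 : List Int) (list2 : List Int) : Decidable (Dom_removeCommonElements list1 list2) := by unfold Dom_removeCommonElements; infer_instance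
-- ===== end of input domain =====

-- B replaces A's per-element index/pop scans by a counting dict over list2 and one
-- filtering pass over list1 (a different, single-pass algorithm).

-- ===== PORT A =====
-- loop body of A: try index/pop, 'except: pass' keeps the list unchanged
def pyRemoveStep (truncatedList : List Int) (elementToTryAndRemove : Int) : List Int :=
  match PySem.List.index? truncatedList elementToTryAndRemove with
  | some indexToPop =>
    match PySem.List.pop? truncatedList (indexToPop : Int) with
    | some r => r.2
    | none => truncatedList
  | none => truncatedList

def removeCommonElements (list1 : List Int) (list2 : List Int) : List Int :=
  list2.foldl pyRemoveStep list1

-- ===== PORT B =====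
def removeCommonElements_alt (list1 : List Int) (list2 : List Int) : List Int :=
  let remove : PySem.Dict Int Int :=
    list2.foldl (fun d x => d.insert x (d.getD x 0 + 1)) PySem.Dict.empty
  (list1.foldl
    (fun (st : List Int × PySem.Dict Int Int) x =>
      if st.2.getD x 0 > 0 then (st.1, st.2.insert x (st.2.getD x 0 - 1))
      else (st.1 ++ [x], st.2))
    ([], remove)).1

-- ===== PRECONDITION & SPEC =====
def Spec_removeCommonElements (list1 : List Int) (list2 : List Int) (out : List Int) : Prop := out = removeCommonElements_alt list1 list2
instance (list1 : List Int) (list2 : List Int) (out : List Int) : Decidable (Spec_removeCommonElements list1 list2 out) := by unfold Spec_removeCommonElements; infer_instance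

-- ===== CLAIM (what is proved, stated in full; the proofs are below) =====
def Claim_equal_removeCommonElements : Prop := ∀ (list1 : List Int) (list2 : List Int), Dom_removeCommonElements list1 list2 → Spec_removeCommonElements list1 list2 (removeCommonElements list1 list2)

-- ===== LEMMAS AND PROOFS =====

-- mathematical core: filter a list by a per-value credit function
def filt : List Int → (Int → Int) → List Int
  | [], _ => []
  | x :: xs, c =>
    if c x > 0 then filt xs (fun v => if v = x then c v - 1 else c v)
    else x :: filt xs c

theorem filt_zero (t : List Int) (c : Int → Int) (h : ∀ v, c v ≤ 0) : filt t c = t := by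
  induction t generalizing c with
  | nil => rfl
  | cons x xs ih =>
    simp [filt, not_lt.mpr (h x)]
    exact ih c h

-- B's filtering loop computes filt with the dict's counts
theorem alt_loop_eq_filt (t : List Int) (acc : List Int) (d : PySem.Dict Int Int) :
    (t.foldl
      (fun (st : List Int × PySem.Dict Int Int) x =>
        if st.2.getD x 0 > 0 then (st.1, st.2.insert x (st.2.getD x 0 - 1))
        else (st.1 ++ [x], st.2))
      (acc, d)).1 = acc ++ filt t (fun v => d.getD v 0) := by
  induction t generalizing acc d with
  | nil => simp [filt]
  | cons x xs ih =>
    by_cases hx : d.getD x 0 > 0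
    · simp only [List.foldl_cons, filt, if_pos hx]
      rw [ih]
      have hfun : (fun v => (d.insert x (d.getD x 0 - 1)).getD v 0)
          = (fun v => if v = x then d.getD v 0 - 1 else d.getD v 0) := by
        funext v
        rw [PySem.Dict.getD_insert]
        split_ifs with h
        · subst h; rfl
        · rfl
      rw [hfun]
    · simp only [List.foldl_cons, filt, if_neg hx]
      rw [ih, List.append_assoc]
      rfl

-- removing the element at the index found by list.index is List.erase
theorem eraseIdx_len (pre suf : List Int) (e : Int) :
    (pre ++ e :: suf).eraseIdx pre.length = pre ++ suf := by
  induction pre with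
  | nil => rfl
  | cons a l ih => simpa using ih

-- A's step (index then pop, except → unchanged) removes the first occurrence, i.e. List.erase
theorem step_eq_erase (t : List Int) (e : Int) : pyRemoveStep t e = t.erase e := by
  unfold pyRemoveStep
  cases h : PySem.List.index? t e with
  | none =>
    rw [List.erase_of_not_mem ((PySem.List.index?_eq_none_iff t e).mp h)]
  | some k =>
    obtain ⟨pre, suf, ht, hlen, hpre⟩ := (PySem.List.index?_eq_some_iff t e k).mp h
    have hk : k < t.length := by
      subst ht; rw [← hlen]; simp
    dsimp only
    rw [PySem.List.pop?_natCast t k hk]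
    subst ht; subst hlen
    rw [eraseIdx_len, List.erase_append_right _ (by simpa using hpre), List.erase_cons_head]

-- shifting one credit for e equals erasing e first
theorem filt_succ (t : List Int) (c : Int → Int) (e : Int) (hc : ∀ v, 0 ≤ c v) :
    filt t (fun v => if v = e then c v + 1 else c v) = filt (t.erase e) c := by
  induction t generalizing c with
  | nil => rfl
  | cons x xs ih =>
    by_cases hxe : x = e
    · subst hxe
      have hfun : (fun v => if v = x then (if v = x then c v + 1 else c v) - 1 else if v = x then c v + 1 else c v) = c := by
        funext v; by_cases h : v = x <;> simp [h]
      simp only [filt, List.erase_cons_head, hfun, if_true]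
      rw [if_pos (show c x + 1 > 0 by linarith [hc x])]
    · rw [List.erase_cons_tail (by simp [hxe])]
      by_cases hx : c x > 0
      · have hpos : (if x = e then c x + 1 else c x) > 0 := by
          rw [if_neg hxe]; exact hx
        simp only [filt, if_pos hpos, if_pos hx]
        have heq : (fun v => if v = x then (if v = e then c v + 1 else c v) - 1 else if v = e then c v + 1 else c v)
            = (fun v => if v = e then (fun w => if w = x then c w - 1 else c w) v + 1 else (fun w => if w = x then c w - 1 else c w) v) := by
          funext v
          by_cases h1 : v = x
          · subst h1; simp [hxe]
          · by_cases h2 : v = e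
            · subst h2; simp [h1]
            · simp [h1, h2]
        rw [heq, ih]
        intro v
        by_cases h : v = x
        · subst h; simp; linarith [hx]
        · simp [h]; exact hc v
      · have hpos : ¬ (if x = e then c x + 1 else c x) > 0 := by
          rw [if_neg hxe]; exact hx
        simp only [filt, if_neg hpos, if_neg hx]
        rw [ih c hc]

-- A's whole loop computes filt with list2's counts
theorem a_eq_filt (t : List Int) (l2 : List Int) :
    l2.foldl pyRemoveStep t = filt t (fun v => (l2.count v : Int)) := by
  induction l2 generalizing t with
  | nil =>
    simp only [List.foldl_nil]
    rw [filt_zero]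
    intro v; simp
  | cons e rest ih =>
    simp only [List.foldl_cons]
    rw [ih, step_eq_erase]
    rw [← filt_succ (t := t) (c := fun v => (rest.count v : Int)) (e := e) (fun v => by positivity)]
    congr 1
    funext v
    by_cases h : v = e
    · subst h; simp
    · simp [h, Ne.symm h]

-- ===== VERDICT (by name: the statement is the Claim_ definition above) =====
theorem removeCommonElements_spec : Claim_equal_removeCommonElements := by
  intro list1 list2 _
  unfold Spec_removeCommonElements removeCommonElements removeCommonElements_alt
  rw [a_eq_filt, alt_loop_eq_filt]
  simp only [List.nil_append]
  congr 1
  funext v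
  rw [PySem.Dict.getD_foldl_insert_add_one, PySem.Dict.getD_empty]
  simp
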